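-- pv_equiv track=rewrite | github.com/taobowang123/COMP47360 | PROJECT_DIR/django_project/dublin_bus/functions.py | create_stop_feature_ref
-- ===== SOURCE A (Python) =====
-- def create_stop_feature_ref(stop_list):
--     """Builds a dictionary with stop numbers as key and 1D lists as values.
--
--     In each 1D list, one element will have the value 1, and all others will have the value 0.
--     Stops in the input list must be in the order that they appear as features in the ml model."""
--     stop_feature_ref = {}
--     for i in stop_list:
--         stop_array = [0] * len(stop_list)
--         for j in range(len(stop_list)):
--             if i == stop_list[j]:
--                 stop_array[j] = 1
--         stop_feature_ref[i] = stop_array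
--
--     return stop_feature_ref
-- ===== SOURCE B (Python) =====
-- def create_stop_feature_ref(stop_list):
--     """One-hot arrays per stop: build an index of occurrence positions in one
--     pass, then construct each array once per distinct stop."""
--     positions = {}
--     for j, s in enumerate(stop_list):
--         positions.setdefault(s, []).append(j)
--     n = len(stop_list)
--     stop_feature_ref = {}
--     for s, ps in positions.items():
--         arr = [0] * n
--         for p in ps:
--             arr[p] = 1
--         stop_feature_ref[s] = arr
--     return stop_feature_ref
-- ===== Notes on version B (the rewrite author's own statement) =====
-- stated objective: faster
-- what changed: A rescans the whole list for every element (including duplicates); B builds a position-index dict in one pass over enumerate and then writes the 1s of each distinct stop's array directly from its recorded positions, removing the inner equality scan and the duplicate re-passes.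
import Mathlib
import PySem

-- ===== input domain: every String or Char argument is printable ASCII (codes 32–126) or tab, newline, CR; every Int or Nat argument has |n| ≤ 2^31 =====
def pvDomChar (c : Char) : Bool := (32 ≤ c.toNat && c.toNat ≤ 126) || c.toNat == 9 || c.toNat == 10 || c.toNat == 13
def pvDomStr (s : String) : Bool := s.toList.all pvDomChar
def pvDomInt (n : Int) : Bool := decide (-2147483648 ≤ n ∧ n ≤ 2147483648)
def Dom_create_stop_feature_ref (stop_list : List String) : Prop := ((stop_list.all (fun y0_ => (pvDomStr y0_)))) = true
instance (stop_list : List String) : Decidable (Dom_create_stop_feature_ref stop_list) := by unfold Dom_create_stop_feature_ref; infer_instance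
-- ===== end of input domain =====

-- B replaces A's quadratic rescan-per-element with a one-pass position index
-- followed by one array construction per distinct stop; return values proved equal.


-- ===== PORT A =====
-- literal port of A: for each i in stop_list, scan the whole list and set 1 where it equals i,
-- then dict-insert under i ('stop_array[j] = 1' is List.set j.toNat; j from range(len) is nonnegative and in range)
def create_stop_feature_ref (stop_list : List String) : List (String × List Int) :=
  (stop_list.foldl
    (fun d i =>
      let stop_array : List Int := PySem.List.pyRepeat [(0 : Int)] (stop_list.length : Int)
      let stop_array :=
        (PySem.List.pyRange 0 (stop_list.length : Int) 1).foldl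
          (fun arr j =>
            match PySem.List.pyGet? stop_list j with
            | some s => if i == s then arr.set j.toNat 1 else arr
            | none => arr)
          stop_array
      d.insert i stop_array)
    PySem.Dict.empty).items

-- ===== PORT B =====
-- literal port of Source B: positions = {stop: [indices]} built over enumerate, then one array per key
def create_stop_feature_ref_alt (stop_list : List String) : List (String × List Int) :=
  let positions : PySem.Dict String (List Int) :=
    (PySem.List.enumerate stop_list 0).foldl
      (fun d p => d.modify p.2 [] (fun l => l ++ [p.1])) PySem.Dict.empty
  (positions.items.foldl
    (fun r kv =>
      let arr := kv.2.foldl (fun arr p => arr.set p.toNat 1)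
        (PySem.List.pyRepeat [(0 : Int)] (stop_list.length : Int))
      r.insert kv.1 arr)
    PySem.Dict.empty).items

-- ===== PRECONDITION & SPEC =====
def Spec_create_stop_feature_ref (stop_list : List String) (out : List (String × List Int)) : Prop := out = create_stop_feature_ref_alt stop_list
instance (stop_list : List String) (out : List (String × List Int)) : Decidable (Spec_create_stop_feature_ref stop_list out) := by unfold Spec_create_stop_feature_ref; infer_instance

-- ===== CLAIM (what is proved, stated in full; the proofs are below) =====
def Claim_equal_create_stop_feature_ref : Prop := ∀ (stop_list : List String), Dom_create_stop_feature_ref stop_list → Spec_create_stop_feature_ref stop_list (create_stop_feature_ref stop_list)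

-- ===== LEMMAS AND PROOFS =====

-- the inner array loop of port A, as a named function (definitionally the port's inner fold)
def pvArrA (stop_list : List String) (i : String) : List Int :=
  (PySem.List.pyRange 0 (stop_list.length : Int) 1).foldl
    (fun arr j =>
      match PySem.List.pyGet? stop_list j with
      | some s => if i == s then arr.set j.toNat 1 else arr
      | none => arr)
    (PySem.List.pyRepeat [(0 : Int)] (stop_list.length : Int))

-- B's positions dict and array builder, as named functions (definitionally the port's folds)
def pvPos (stop_list : List String) : PySem.Dict String (List Int) :=
  (PySem.List.enumerate stop_list 0).foldl
    (fun d p => d.modify p.2 [] (fun l => l ++ [p.1])) PySem.Dict.empty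

def pvArrB (stop_list : List String) (ps : List Int) : List Int :=
  ps.foldl (fun arr p => arr.set p.toNat 1)
    (PySem.List.pyRepeat [(0 : Int)] (stop_list.length : Int))

lemma pv_setFold_getElem? (ps : List Int) (arr : List Int) (k : Nat) :
    (ps.foldl (fun a p => a.set p.toNat 1) arr)[k]? =
      if k ∈ ps.map Int.toNat ∧ k < arr.length then some 1 else arr[k]? := by
  induction ps generalizing arr with
  | nil => simp
  | cons p rest ih =>
    rw [List.foldl_cons, ih, List.length_set, List.getElem?_set, List.map_cons]
    by_cases h2 : k < arr.length
    · by_cases h1 : k ∈ rest.map Int.toNat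
      · simp [h1, h2]
      · by_cases h3 : p.toNat = k
        · simp [h1, h2, h3]
        · simp [h1, h2, h3, Ne.symm h3]
    · by_cases h3 : p.toNat = k
      · simp [h2, h3]
      · simp [h2, h3, Ne.symm h3]

lemma pv_getD_foldl_insert_fun {ν : Type} (l : List String) (f : String → ν)
    (d : PySem.Dict String ν) (k : String) (dflt : ν) :
    (l.foldl (fun d i => d.insert i (f i)) d).getD k dflt =
      if k ∈ l then f k else d.getD k dflt := by
  induction l generalizing d with
  | nil => simp
  | cons x xs ih =>
    simp only [List.foldl_cons, ih, PySem.Dict.getD_insert, List.mem_cons]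
    by_cases hx : k ∈ xs <;> by_cases he : k = x <;> simp_all

lemma pv_A_items (stop_list : List String) :
    create_stop_feature_ref stop_list =
      (PySem.Set.ofList stop_list).map (fun s => (s, pvArrA stop_list s)) := by
  have hrfl : create_stop_feature_ref stop_list =
      (stop_list.foldl (fun d i => d.insert i (pvArrA stop_list i)) PySem.Dict.empty).items := rfl
  have hnd : (stop_list.foldl (fun d i => d.insert i (pvArrA stop_list i))
      PySem.Dict.empty).keys.Nodup :=
    PySem.Dict.nodup_keys_foldl_insert stop_list (fun _ i => pvArrA stop_list i)
      PySem.Dict.empty (by simp)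
  have hkeys : (stop_list.foldl (fun d i => d.insert i (pvArrA stop_list i))
      PySem.Dict.empty).keys = PySem.Set.ofList stop_list := by
    rw [PySem.Dict.keys_foldl_insert stop_list (fun _ i => pvArrA stop_list i)]
    simp [PySem.Set.update, PySem.Set.ofList_eq_foldl, PySem.Dict.keys_empty]
  rw [hrfl, PySem.Dict.items_eq_map_keys _ hnd [], hkeys]
  apply List.map_congr_left
  intro k hk
  have hk' : k ∈ stop_list := (PySem.Set.mem_ofList stop_list k).mp hk
  simp [pv_getD_foldl_insert_fun, hk']

lemma pv_pos_keys (stop_list : List String) :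
    (pvPos stop_list).keys = PySem.Set.ofList stop_list := by
  unfold pvPos
  rw [PySem.Dict.keys_foldl_modify_key (PySem.List.enumerate stop_list 0)
    (fun p => p.2) [] (fun _ p => fun l => l ++ [p.1]) PySem.Dict.empty]
  simp [PySem.List.map_snd_enumerate, PySem.Set.update, PySem.Set.ofList_eq_foldl,
    PySem.Dict.keys_empty]

lemma pv_pos_nodup (stop_list : List String) : (pvPos stop_list).keys.Nodup := by
  unfold pvPos
  exact PySem.Dict.nodup_keys_foldl_modify_key (PySem.List.enumerate stop_list 0)
    (fun p => p.2) [] (fun _ p => fun l => l ++ [p.1]) PySem.Dict.empty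
    (by simp)

lemma pv_pos_getD (stop_list : List String) (c : String) :
    (pvPos stop_list).getD c [] =
      ((PySem.List.enumerate stop_list 0).filter (fun q => q.2 == c)).map (fun q => q.1) := by
  have h := PySem.Dict.getD_foldl_modify_append
    ((PySem.List.enumerate stop_list 0).map Prod.swap) PySem.Dict.empty c
  rw [List.foldl_map] at h
  simp only [Prod.fst_swap, Prod.snd_swap] at h
  unfold pvPos
  rw [h]
  simp [List.filter_map, List.map_map, Function.comp_def]

lemma pv_B_items (stop_list : List String) :
    create_stop_feature_ref_alt stop_list =
      (PySem.Set.ofList stop_list).map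
        (fun s => (s, pvArrB stop_list ((pvPos stop_list).getD s []))) := by
  have hrfl : create_stop_feature_ref_alt stop_list =
      ((pvPos stop_list).items.foldl
        (fun r kv => r.insert kv.1 (pvArrB stop_list kv.2)) PySem.Dict.empty).items := rfl
  have hnodup : ((pvPos stop_list).items.map (fun kv => kv.1)).Nodup := pv_pos_nodup stop_list
  have hfresh := PySem.Dict.items_foldl_insert_fresh (pvPos stop_list).items
    (fun kv => kv.1) (fun kv => pvArrB stop_list kv.2) PySem.Dict.empty
    (fun a _ => PySem.Dict.contains_empty a.1) hnodup
  rw [hrfl, hfresh]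
  have hitems : (pvPos stop_list).items =
      (PySem.Set.ofList stop_list).map (fun k => (k, (pvPos stop_list).getD k [])) := by
    rw [PySem.Dict.items_eq_map_keys _ (pv_pos_nodup stop_list) [], pv_pos_keys]
  rw [hitems]
  have hemp : (PySem.Dict.empty : PySem.Dict String (List Int)).items = [] := rfl
  simp [List.map_map, Function.comp_def, hemp]

lemma pv_mem_A (stop_list : List String) (s : String) (k : Nat) :
    (k ∈ (((PySem.List.pyRange 0 (stop_list.length : Int) 1).filter
        (fun j => PySem.List.pyGet? stop_list j == some s)).map Int.toNat)) ↔
      ∃ h : k < stop_list.length, stop_list[k] = s := by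
  constructor
  · rintro hmem
    rcases List.mem_map.mp hmem with ⟨j, hj, rfl⟩
    rcases List.mem_filter.mp hj with ⟨hrange, hget⟩
    rcases (PySem.List.mem_pyRange_one).mp hrange with ⟨h0, hlt⟩
    have hj' : j = ((j.toNat : Nat) : Int) := (Int.toNat_of_nonneg h0).symm
    rw [hj', PySem.List.pyGet?_natCast] at hget
    have := beq_iff_eq.mp hget
    have hk : j.toNat < stop_list.length := by omega
    refine ⟨hk, ?_⟩
    have : stop_list[j.toNat]? = some s := this
    simpa [List.getElem?_eq_getElem hk] using this
  · rintro ⟨hk, hs⟩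
    refine List.mem_map.mpr ⟨(k : Int), ?_, by simp⟩
    refine List.mem_filter.mpr ⟨(PySem.List.mem_pyRange_one).mpr ⟨by omega, by omega⟩, ?_⟩
    rw [PySem.List.pyGet?_natCast]
    simp [List.getElem?_eq_getElem hk, hs]

lemma pv_mem_B (stop_list : List String) (s : String) (k : Nat) :
    (k ∈ ((((PySem.List.enumerate stop_list 0).filter (fun q => q.2 == s)).map
        (fun q => q.1)).map Int.toNat)) ↔
      ∃ h : k < stop_list.length, stop_list[k] = s := by
  constructor
  · rintro hmem
    rcases List.mem_map.mp hmem with ⟨j, hj, rfl⟩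
    rcases List.mem_map.mp hj with ⟨q, hq, rfl⟩
    rcases List.mem_filter.mp hq with ⟨hqmem, hqs⟩
    rcases (PySem.List.mem_enumerate_iff stop_list 0 q).mp hqmem with ⟨m, hm, rfl⟩
    have hms : stop_list[m] = s := by simpa using beq_iff_eq.mp hqs
    exact ⟨by simpa using hm, by simpa using hms⟩
  · rintro ⟨hk, hs⟩
    refine List.mem_map.mpr ⟨(k : Int), List.mem_map.mpr ⟨((k : Int), stop_list[k]), ?_, rfl⟩, by simp⟩
    refine List.mem_filter.mpr ⟨?_, by simp [hs]⟩
    exact (PySem.List.mem_enumerate_iff stop_list 0 _).mpr ⟨k, hk, by simp⟩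

lemma pv_arr_eq (stop_list : List String) (s : String) :
    pvArrA stop_list s = pvArrB stop_list ((pvPos stop_list).getD s []) := by
  have hA : pvArrA stop_list s =
      ((PySem.List.pyRange 0 (stop_list.length : Int) 1).filter
          (fun j => PySem.List.pyGet? stop_list j == some s)).foldl
        (fun arr p => arr.set p.toNat 1)
        (PySem.List.pyRepeat [(0 : Int)] (stop_list.length : Int)) := by
    unfold pvArrA
    rw [PySem.List.foldl_congr_mem _ _
      (fun arr j => if PySem.List.pyGet? stop_list j == some s then arr.set j.toNat 1 else arr) _
      (by
        intro acc x _
        cases hx : PySem.List.pyGet? stop_list x with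
        | none => simp [hx]
        | some t =>
          by_cases hts : s = t
          · subst hts; simp [hx]
          · simp [hx, hts, Ne.symm hts])]
    rw [PySem.List.foldl_if_eq_foldl_filter]
  rw [hA, pv_pos_getD]
  unfold pvArrB
  apply List.ext_getElem?
  intro k
  rw [pv_setFold_getElem?, pv_setFold_getElem?, PySem.List.pyRepeat_singleton]
  simp only [Int.toNat_natCast]
  by_cases hm : ∃ h : k < stop_list.length, stop_list[k] = s
  · obtain ⟨hk, hs⟩ := hm
    have hkr : k < (List.replicate stop_list.length (0 : Int)).length := by
      simpa using hk
    rw [if_pos ⟨(pv_mem_A stop_list s k).mpr ⟨hk, hs⟩, hkr⟩,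
        if_pos ⟨(pv_mem_B stop_list s k).mpr ⟨hk, hs⟩, hkr⟩]
  · rw [if_neg (fun h => hm ((pv_mem_A stop_list s k).mp h.1)),
        if_neg (fun h => hm ((pv_mem_B stop_list s k).mp h.1))]

-- ===== VERDICT (by name: the statement is the Claim_ definition above) =====
theorem create_stop_feature_ref_spec : Claim_equal_create_stop_feature_ref := by
  intro stop_list _
  show create_stop_feature_ref stop_list = create_stop_feature_ref_alt stop_list
  rw [pv_A_items, pv_B_items]
  exact List.map_congr_left (fun s _ => by rw [pv_arr_eq])
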